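-- pv_equiv track=rewrite | github.com/errantlinguist/tangrams-analysis | tangrams_analysis/utterances.py | token_seq_repr
-- ===== SOURCE A (Python) =====
-- from typing import Any, Callable, DefaultDict, Iterable, Iterator, List, Sequence, Tuple, Union
--
-- def token_seq_repr(tokens: Iterable[str]) -> str:
-- 	token_iter = iter(tokens)
-- 	formatted_tokens = []
--
-- 	next_token = __capitalize_first_char(next(token_iter))
-- 	end_reached = False
-- 	while not end_reached:
-- 		current_token = next_token
-- 		try:
-- 			next_token = next(token_iter)
-- 		except StopIteration:
-- 			current_token = current_token + '.'
-- 			end_reached = True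
-- 		formatted_tokens.append(current_token)
--
-- 	return ' '.join(formatted_tokens)
--
-- def __capitalize_first_char(string: str) -> str:
-- 	if len(string) < 2:
-- 		return string.upper()
-- 	else:
-- 		first_char = string[0]
-- 		return first_char.upper() + string[1:]
-- ===== SOURCE B (Python) =====
-- def token_seq_repr(tokens):
-- 	token_iter = iter(tokens)
-- 	first = _capitalize_first_char(next(token_iter))  # StopIteration on empty input, like A
-- 	rest = list(token_iter)
-- 	if rest:
-- 		rest[-1] = rest[-1] + '.'
-- 		return ' '.join([first] + rest)
-- 	else:
-- 		return first + '.'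
--
-- def _capitalize_first_char(string):
-- 	if len(string) < 2:
-- 		return string.upper()
-- 	else:
-- 		return string[0].upper() + string[1:]
-- ===== Notes on version B (the rewrite author's own statement) =====
-- stated objective: simpler
-- what changed: Replaces A's one-token-lookahead while-loop (buffering next_token and catching StopIteration inside the loop) with a head-plus-tail formulation: take the first token, materialize the rest via list(iterator) in C, append '.' to its last element (or to the lone first token) and join once.
import Mathlib
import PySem

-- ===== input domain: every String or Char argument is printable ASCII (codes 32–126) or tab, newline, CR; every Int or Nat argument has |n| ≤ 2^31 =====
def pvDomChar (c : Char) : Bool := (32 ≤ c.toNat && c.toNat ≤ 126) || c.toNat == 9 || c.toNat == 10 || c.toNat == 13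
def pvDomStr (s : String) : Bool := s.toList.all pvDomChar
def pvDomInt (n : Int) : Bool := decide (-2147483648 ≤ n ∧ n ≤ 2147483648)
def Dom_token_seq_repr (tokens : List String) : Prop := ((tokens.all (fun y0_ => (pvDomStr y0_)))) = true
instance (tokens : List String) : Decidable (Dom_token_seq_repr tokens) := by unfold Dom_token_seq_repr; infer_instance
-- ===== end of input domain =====

-- B replaces A's lookahead while-loop with head + tail-list + dot-on-last + single join (objective: simpler).
-- ===== PORT A =====
-- __capitalize_first_char: string[0] is one character, its .upper() is PySem.Chars.upperChar; '+' is list append on code points (exact)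
def pvCapA (s : String) : String :=
  if PySem.Str.len s < 2 then PySem.Str.upper s
  else match PySem.Str.pyGet? s 0 with
    | some c => String.ofList (PySem.Chars.upperChar c :: (PySem.Str.slice s (some 1) none).toList)
    | none => s  -- unreachable: len s ≥ 2

-- the while-loop with its one-token lookahead buffer: state = (current buffered token, remaining iterator, formatted_tokens)
def pvLoopA : String → List String → List String → List String
  | cur, [], acc => acc ++ [cur ++ "."]          -- next() raises StopIteration: dot, append, stop
  | cur, t :: rest, acc => pvLoopA t rest (acc ++ [cur])

def token_seq_repr (tokens : List String) : String :=
  match tokens with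
  | [] => ""  -- Python raises StopIteration here; excluded by Pre_token_seq_repr
  | t :: rest => PySem.Str.join " " (pvLoopA (pvCapA t) rest [])

-- ===== PORT B =====
def pvCapB (s : String) : String :=
  if PySem.Str.len s < 2 then PySem.Str.upper s
  else match PySem.Str.pyGet? s 0 with
    | some c => String.ofList (PySem.Chars.upperChar c :: (PySem.Str.slice s (some 1) none).toList)
    | none => s  -- unreachable: len s ≥ 2

def token_seq_repr_alt (tokens : List String) : String :=
  match tokens with
  | [] => ""  -- Python raises StopIteration here; excluded by Pre_token_seq_repr
  | first :: rest =>
    let f := pvCapB first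
    if h : rest ≠ [] then
      -- rest[-1] = rest[-1] + '.'; ' '.join([f] + rest)
      PySem.Str.join " " (f :: (rest.dropLast ++ [rest.getLast h ++ "."]))
    else f ++ "."

-- ===== PRECONDITION & SPEC =====
-- Pre_ excludes only the empty list, on which both Pythons raise StopIteration (next on an empty iterator)
def Pre_token_seq_repr (tokens : List String) : Prop := tokens ≠ []
instance (tokens : List String) : Decidable (Pre_token_seq_repr tokens) := by unfold Pre_token_seq_repr; infer_instance
def pvWitness_token_seq_repr : List String := (["hello", "world"])
def Spec_token_seq_repr (tokens : List String) (out : String) : Prop := out = token_seq_repr_alt tokens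
instance (tokens : List String) (out : String) : Decidable (Spec_token_seq_repr tokens out) := by unfold Spec_token_seq_repr; infer_instance

-- ===== CLAIM (what is proved, stated in full; the proofs are below) =====
def Claim_equal_token_seq_repr : Prop := ∀ (tokens : List String), Dom_token_seq_repr tokens → Pre_token_seq_repr tokens → Spec_token_seq_repr tokens (token_seq_repr tokens)

-- ===== LEMMAS AND PROOFS =====
-- A's loop result, accumulator made explicit, as "dot the last of cur :: rest"
lemma pvLoopA_eq (rest : List String) : ∀ (cur : String) (acc : List String),
    pvLoopA cur rest acc = acc ++ (cur :: rest).dropLast ++ [(cur :: rest).getLast (by simp) ++ "."] := by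
  induction rest with
  | nil => intro cur acc; simp [pvLoopA]
  | cons t ts ih =>
      intro cur acc
      simp only [pvLoopA, ih]
      simp [List.dropLast_cons_of_ne_nil, List.getLast_cons]

theorem token_seq_repr_spec : Claim_equal_token_seq_repr := by
  intro tokens _ hpre
  unfold Spec_token_seq_repr
  match tokens with
  | [] => exact absurd rfl hpre
  | first :: rest =>
    have hcap : pvCapA first = pvCapB first := rfl
    cases rest with
    | nil =>
        simp [token_seq_repr, token_seq_repr_alt, pvLoopA, hcap,
          PySem.Str.join]
    | cons t ts =>
        simp only [token_seq_repr, token_seq_repr_alt, pvLoopA_eq, hcap]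
        have hne : (t :: ts) ≠ ([] : List String) := by simp
        simp [List.dropLast_cons_of_ne_nil, List.getLast_cons, hne]
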